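-- pv_equiv track=rewrite | github.com/thecodinghyrax/Rejuvenate | controller.py | _get_match_score
-- ===== SOURCE A (Python) =====
-- def _get_match_score(addon_name, name_to_search):
--     '''Compares two names and derives a score of how close they are
--     :param addon_name: The name of the local addon
--     :param name_to_search: An addon name from the website
--     :return: A score of how closely the two names matched
--     '''
--     if addon_name in name_to_search and len(addon_name) == len(name_to_search):
--         return 100 # 100% match :)
--     name_to_search_list = list(name_to_search)
--     matched_count = 0
--     for char in list(addon_name):
--         if char in name_to_search_list:
--             name_to_search_list.pop(name_to_search_list.index(char))
--             matched_count += 1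
--
--     return matched_count - len(name_to_search_list)
-- ===== SOURCE B (Python) =====
-- def _get_match_score(addon_name, name_to_search):
--     if addon_name == name_to_search:
--         return 100
--     a = sorted(addon_name)
--     b = sorted(name_to_search)
--     matched = 0
--     i = j = 0
--     while i < len(a) and j < len(b):
--         if a[i] == b[j]:
--             matched += 1
--             i += 1
--             j += 1
--         elif a[i] < b[j]:
--             i += 1
--         else:
--             j += 1
--     return 2 * matched - len(name_to_search)
-- ===== Notes on version B (the rewrite author's own statement) =====
-- stated objective: faster
-- what changed: Replaces A's per-character membership test + index + pop over the remaining search list (quadratic scanning) by sorting both strings once and counting matches with a two-pointer merge; the substring guard collapses to a plain string equality test.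
import Mathlib
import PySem

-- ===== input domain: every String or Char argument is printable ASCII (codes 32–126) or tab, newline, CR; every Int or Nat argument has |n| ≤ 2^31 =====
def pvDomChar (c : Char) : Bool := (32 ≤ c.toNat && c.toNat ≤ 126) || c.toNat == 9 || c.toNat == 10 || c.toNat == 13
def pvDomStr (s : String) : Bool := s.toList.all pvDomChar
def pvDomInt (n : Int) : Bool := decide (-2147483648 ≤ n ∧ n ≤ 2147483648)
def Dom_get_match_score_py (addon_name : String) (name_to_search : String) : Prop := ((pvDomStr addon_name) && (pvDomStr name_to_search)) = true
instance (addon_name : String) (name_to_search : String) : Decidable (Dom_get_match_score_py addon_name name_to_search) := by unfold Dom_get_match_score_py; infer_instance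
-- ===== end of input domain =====

-- B replaces A's per-character search-and-pop loop (quadratic scanning) by a two-pointer
-- merge over the two sorted character lists (alternative decomposition, same exact result).

-- ===== PORT A =====
-- one iteration of A's loop body: if char in rem: rem.pop(rem.index(char)); matched += 1
def aStep (st : List Char × Int) (c : Char) : List Char × Int :=
  if c ∈ st.1 then
    match PySem.List.index? st.1 c with
    | some i =>
      match PySem.List.pop? st.1 (i : Int) with
      | some r => (r.2, st.2 + 1)
      | none => (st.1, st.2)
    | none => (st.1, st.2)
  else (st.1, st.2)

def get_match_score_py (addon_name : String) (name_to_search : String) : Int :=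
  if PySem.Str.isIn addon_name name_to_search = true ∧
      PySem.Str.len addon_name = PySem.Str.len name_to_search then 100
  else
    let st := addon_name.toList.foldl aStep (name_to_search.toList, 0)
    st.2 - (st.1.length : Int)

-- ===== PORT B =====
-- the while-loop of Source B: two pointers over sorted lists, advancing = dropping a head
def twoPtr : List Char → List Char → Nat
  | [], _ => 0
  | _ :: _, [] => 0
  | x :: xs, y :: ys =>
    if x = y then twoPtr xs ys + 1
    else if x < y then twoPtr xs (y :: ys)
    else twoPtr (x :: xs) ys
termination_by a b => a.length + b.length

def get_match_score_py_alt (addon_name : String) (name_to_search : String) : Int :=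
  if addon_name = name_to_search then 100
  else
    let a := PySem.List.sorted addon_name.toList (fun c => c) false
    let b := PySem.List.sorted name_to_search.toList (fun c => c) false
    2 * (twoPtr a b : Int) - (name_to_search.toList.length : Int)

-- ===== PRECONDITION & SPEC =====
def Spec_get_match_score_py (addon_name : String) (name_to_search : String) (out : Int) : Prop := out = get_match_score_py_alt addon_name name_to_search
instance (addon_name : String) (name_to_search : String) (out : Int) : Decidable (Spec_get_match_score_py addon_name name_to_search out) := by unfold Spec_get_match_score_py; infer_instance

-- ===== CLAIM (what is proved, stated in full; the proofs are below) =====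
def Claim_equal_get_match_score_py : Prop := ∀ (addon_name : String) (name_to_search : String), Dom_get_match_score_py addon_name name_to_search → Spec_get_match_score_py addon_name name_to_search (get_match_score_py addon_name name_to_search)

-- ===== LEMMAS AND PROOFS =====

-- size of the multiset intersection: the common characterisation of both loops
def mcard (a b : List Char) : Nat :=
  Multiset.card ((a : Multiset Char) ∩ (b : Multiset Char))

lemma aStep_of_mem {rem : List Char} {m : Int} {c : Char} (h : c ∈ rem) :
    aStep (rem, m) c = (rem.erase c, m + 1) := by
  obtain ⟨k, hk⟩ := (PySem.List.index?_isSome_iff (xs := rem) (v := c)).mpr h |> Option.isSome_iff_exists.mp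
  obtain ⟨pre, suf, hdec, hlen, hpre⟩ := (PySem.List.index?_eq_some_iff _ _ _).mp hk
  obtain ⟨hklt, -, -⟩ := PySem.List.getElem_of_index?_eq_some hk
  simp only [aStep, if_pos h, hk, PySem.List.pop?_natCast _ _ hklt]
  subst hdec hlen
  rw [List.erase_append_right _ hpre, List.erase_cons_head,
    List.eraseIdx_append_of_length_le (le_refl pre.length)]
  simp

lemma mcard_cons_of_mem {c : Char} {a b : List Char} (h : c ∈ b) :
    mcard (c :: a) b = mcard a (b.erase c) + 1 := by
  unfold mcard
  rw [show ((c :: a : List Char) : Multiset Char) = c ::ₘ (a : Multiset Char) from rfl,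
    Multiset.cons_inter_of_pos _ (by simpa using h), Multiset.card_cons, ← Multiset.coe_erase]

lemma mcard_cons_of_not_mem {c : Char} {a b : List Char} (h : c ∉ b) :
    mcard (c :: a) b = mcard a b := by
  unfold mcard
  rw [show ((c :: a : List Char) : Multiset Char) = c ::ₘ (a : Multiset Char) from rfl,
    Multiset.cons_inter_of_neg _ (by simpa using h)]

lemma loopA (a : List Char) : ∀ (b : List Char) (m : Int),
    (a.foldl aStep (b, m)).2 = m + mcard a b ∧
    (a.foldl aStep (b, m)).1.length + mcard a b = b.length := by
  induction a with
  | nil => intro b m; simp [mcard]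
  | cons c a ih =>
    intro b m
    by_cases h : c ∈ b
    · have hlen' : 0 < b.length := List.length_pos_of_mem h
      obtain ⟨ih1, ih2⟩ := ih (b.erase c) (m + 1)
      rw [List.foldl_cons, aStep_of_mem h]
      refine ⟨?_, ?_⟩
      · rw [ih1, mcard_cons_of_mem h]; push_cast; ring
      · rw [mcard_cons_of_mem h]
        rw [List.length_erase_of_mem h] at ih2
        omega
    · obtain ⟨ih1, ih2⟩ := ih b m
      rw [List.foldl_cons]
      simp only [aStep, if_neg h]
      exact ⟨by rw [ih1, mcard_cons_of_not_mem h], by rw [mcard_cons_of_not_mem h]; exact ih2⟩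

lemma twoPtr_eq_mcard : ∀ (a b : List Char),
    a.Pairwise (· ≤ ·) → b.Pairwise (· ≤ ·) → twoPtr a b = mcard a b := by
  intro a b
  induction a, b using twoPtr.induct with
  | case1 b => intro _ _; simp [twoPtr, mcard]
  | case2 x xs => intro _ _; simp [twoPtr, mcard]
  | case3 xs y ys ih =>
    intro ha hb
    rw [twoPtr, if_pos rfl, ih ha.tail hb.tail, mcard_cons_of_mem (List.mem_cons_self),
      List.erase_cons_head]
  | case4 x xs y ys hne hlt ih =>
    intro ha hb
    have hx : x ∉ y :: ys := by
      intro hmem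
      rcases List.mem_cons.mp hmem with h | h
      · exact hne h
      · exact absurd hlt (not_lt.mpr (List.rel_of_pairwise_cons hb h))
    rw [twoPtr, if_neg hne, if_pos hlt, ih ha.tail hb, mcard_cons_of_not_mem hx]
  | case5 x xs y ys hne hnlt ih =>
    intro ha hb
    have hy : y ∉ x :: xs := by
      intro hmem
      rcases List.mem_cons.mp hmem with h | h
      · exact hne h.symm
      · exact absurd (not_lt.mp hnlt) (not_le.mpr (lt_of_le_of_ne (List.rel_of_pairwise_cons ha h) (fun hxy => hne (hxy ▸ rfl))))
    have : mcard (x :: xs) (y :: ys) = mcard (x :: xs) ys := by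
      unfold mcard
      rw [Multiset.inter_comm,
        show ((y :: ys : List Char) : Multiset Char) = y ::ₘ (ys : Multiset Char) from rfl,
        Multiset.cons_inter_of_neg _ (by simpa using hy), Multiset.inter_comm]
    rw [twoPtr, if_neg hne, if_neg hnlt, ih ha hb.tail, this]

lemma mcard_perm {a a' b b' : List Char} (ha : a.Perm a') (hb : b.Perm b') :
    mcard a b = mcard a' b' := by
  simp [mcard, Multiset.coe_eq_coe.mpr ha, Multiset.coe_eq_coe.mpr hb]

lemma mcard_le_right (a b : List Char) : mcard a b ≤ b.length := by
  simpa [mcard] using Multiset.card_le_card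
    (Multiset.inter_le_right (s := (a : Multiset Char)) (t := (b : Multiset Char)))

-- ===== VERDICT (by name: the statement is the Claim_ definition above) =====
theorem get_match_score_py_spec : Claim_equal_get_match_score_py := by
  intro a s _
  unfold Spec_get_match_score_py get_match_score_py get_match_score_py_alt
  by_cases h : a = s
  · subst h
    rw [if_pos rfl, if_pos ⟨(PySem.Str.isIn_iff_infix _ _).mpr (List.infix_refl _), rfl⟩]
  · rw [if_neg h, if_neg ?_]
    · obtain ⟨h1, h2⟩ := loopA a.toList s.toList 0
      have hm : twoPtr (PySem.List.sorted a.toList (fun c => c) false)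
          (PySem.List.sorted s.toList (fun c => c) false) = mcard a.toList s.toList := by
        rw [twoPtr_eq_mcard _ _ (PySem.List.sorted_pairwise _ _) (PySem.List.sorted_pairwise _ _)]
        exact mcard_perm (PySem.List.sorted_perm _ _ _) (PySem.List.sorted_perm _ _ _)
      have hle := mcard_le_right a.toList s.toList
      simp only [hm]
      omega
    · rintro ⟨h1, h2⟩
      have hinf : a.toList <:+: s.toList := (PySem.Str.isIn_iff_infix _ _).mp h1
      have hlen : a.toList.length = s.toList.length := by
        simpa [PySem.Str.len_eq] using h2
      exact h (String.toList_inj.mp (hinf.sublist.eq_of_length hlen))
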